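-- pv_equiv track=rewrite | github.com/adi2809/euler-trail-builder | backend/app.py | _undirected_connectivity_ok
-- ===== SOURCE A (Python) =====
-- from collections import defaultdict, deque
-- from typing import List, Tuple, Optional, Set, Dict
--
-- def _undirected_connectivity_ok(nodes: Set[str], edges: List[Tuple[str, str]]) -> bool:
--     """Check if all non-isolated vertices are connected."""
--     deg = defaultdict(int)
--     g = defaultdict(list)
--     for u, v in edges:
--         deg[u] += 1
--         deg[v] += 1
--         g[u].append(v)
--         g[v].append(u)
--
--     non_isolated = {u for u in nodes if deg[u] > 0}
--     if not non_isolated: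
--         return True
--
--     start = next(iter(non_isolated))
--     seen = {start}
--     q = deque([start])
--     while q:
--         x = q.popleft()
--         for y in g[x]:
--             if y not in seen:
--                 seen.add(y)
--                 q.append(y)
--     return seen == non_isolated
-- ===== SOURCE B (Python) =====
-- def _undirected_connectivity_ok(nodes, edges):
--     """Check if all non-isolated vertices are connected (edge-relaxation passes instead of BFS)."""
--     touched = set()
--     for u, v in edges:
--         touched.add(u)
--         touched.add(v)
--     non_isolated = {u for u in nodes if u in touched}
--     if not non_isolated:
--         return True
--     comp = {next(iter(non_isolated))}
--     for _ in range(2 * len(edges)):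
--         for u, v in edges:
--             if u in comp:
--                 comp.add(v)
--             if v in comp:
--                 comp.add(u)
--     return comp == non_isolated
-- ===== Notes on version B (the rewrite author's own statement) =====
-- stated objective: alternative
-- what changed: Replaces the BFS (adjacency-list dict + deque + visited set) by a Bellman-Ford-style fixpoint: the component of the start vertex is grown by repeated relaxation passes over the raw edge list, and isolation is tested by endpoint membership instead of a degree counter.
import Mathlib
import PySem

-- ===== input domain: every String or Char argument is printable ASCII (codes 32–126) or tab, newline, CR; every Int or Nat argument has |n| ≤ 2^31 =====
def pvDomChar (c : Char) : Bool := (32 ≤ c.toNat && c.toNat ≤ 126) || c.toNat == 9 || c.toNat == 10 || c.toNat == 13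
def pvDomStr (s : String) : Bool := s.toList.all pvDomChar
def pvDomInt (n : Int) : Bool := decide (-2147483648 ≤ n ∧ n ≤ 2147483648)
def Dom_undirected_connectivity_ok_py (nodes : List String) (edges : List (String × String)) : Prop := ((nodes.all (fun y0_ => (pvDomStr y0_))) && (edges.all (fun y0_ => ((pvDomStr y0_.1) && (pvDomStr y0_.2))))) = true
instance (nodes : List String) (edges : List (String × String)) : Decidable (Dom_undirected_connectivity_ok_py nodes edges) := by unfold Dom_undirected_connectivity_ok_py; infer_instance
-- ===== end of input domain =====

-- B replaces A's BFS (degree counter + adjacency dict + deque) by edge-relaxation passes over the raw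
-- edge list (endpoint membership instead of degrees); same Bool on every input (objective: alternative).

-- ===== PORT A =====
-- deg = defaultdict(int); for u, v in edges: deg[u] += 1; deg[v] += 1
def pvDeg (edges : List (String × String)) : PySem.Dict String Int :=
  edges.foldl (fun d e => (d.modify e.1 0 (· + 1)).modify e.2 0 (· + 1)) PySem.Dict.empty

-- g = defaultdict(list); for u, v in edges: g[u].append(v); g[v].append(u)
def pvGraph (edges : List (String × String)) : PySem.Dict String (List String) :=
  edges.foldl (fun d e => (d.modify e.1 [] (· ++ [e.2])).modify e.2 [] (· ++ [e.1]))
    PySem.Dict.empty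

-- A's while-loop over the deque; fuel only makes the SAME computation total (2*|edges|+2 is proved sufficient)
def pvBFS (g : PySem.Dict String (List String)) :
    Nat → PySem.Set String → List String → PySem.Set String
  | fuel + 1, seen, x :: q =>
      let p := (g.getD x []).foldl
        (fun (p : PySem.Set String × List String) y =>
          if PySem.Set.contains p.1 y then p else (PySem.Set.add p.1 y, p.2 ++ [y]))
        (seen, q)
      pvBFS g fuel p.1 p.2
  | _, seen, _ => seen

def undirected_connectivity_ok_py (nodes : List String) (edges : List (String × String)) : Bool :=
  let deg := pvDeg edges
  let non_isolated : PySem.Set String :=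
    PySem.Set.ofList (nodes.filter (fun u => decide (0 < deg.getD u 0)))
  match non_isolated with
  | [] => true
  | start :: _ =>
      let seen := pvBFS (pvGraph edges) (2 * edges.length + 2)
        (PySem.Set.add PySem.Set.empty start) [start]
      PySem.Set.equal seen non_isolated

-- ===== PORT B =====
-- one relaxation step for edge e:  if u in comp: comp.add(v);  if v in comp: comp.add(u)
def pvRelax (c : PySem.Set String) (e : String × String) : PySem.Set String :=
  let c1 := if PySem.Set.contains c e.1 then PySem.Set.add c e.2 else c
  if PySem.Set.contains c1 e.2 then PySem.Set.add c1 e.1 else c1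

-- one full pass:  for u, v in edges: …
def pvPass (edges : List (String × String)) (c : PySem.Set String) : PySem.Set String :=
  edges.foldl pvRelax c

def undirected_connectivity_ok_py_alt (nodes : List String) (edges : List (String × String)) : Bool :=
  let touched : PySem.Set String :=
    edges.foldl (fun s e => PySem.Set.add (PySem.Set.add s e.1) e.2) PySem.Set.empty
  let non_isolated : PySem.Set String :=
    PySem.Set.ofList (nodes.filter (fun u => PySem.Set.contains touched u))
  match non_isolated with
  | [] => true
  | start :: _ =>
      let comp := (List.range (2 * edges.length)).foldl (fun c _ => pvPass edges c)
        (PySem.Set.add PySem.Set.empty start)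
      PySem.Set.equal comp non_isolated

-- ===== PRECONDITION & SPEC =====
def Spec_undirected_connectivity_ok_py (nodes : List String) (edges : List (String × String)) (out : Bool) : Prop := out = undirected_connectivity_ok_py_alt nodes edges
instance (nodes : List String) (edges : List (String × String)) (out : Bool) : Decidable (Spec_undirected_connectivity_ok_py nodes edges out) := by unfold Spec_undirected_connectivity_ok_py; infer_instance

-- ===== CLAIM (what is proved, stated in full; the proofs are below) =====
def Claim_equal_undirected_connectivity_ok_py : Prop := ∀ (nodes : List String) (edges : List (String × String)), Dom_undirected_connectivity_ok_py nodes edges → Spec_undirected_connectivity_ok_py nodes edges (undirected_connectivity_ok_py nodes edges)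

-- ===== LEMMAS AND PROOFS =====

-- all edge endpoints, adjacency, reachability
def pvEnds (edges : List (String × String)) : List String :=
  edges.flatMap (fun e => [e.1, e.2])

def pvAdj (edges : List (String × String)) (u v : String) : Prop :=
  (u, v) ∈ edges ∨ (v, u) ∈ edges

def pvReach (edges : List (String × String)) (s v : String) : Prop :=
  Relation.ReflTransGen (pvAdj edges) s v

theorem pvAdj_mem_ends {edges : List (String × String)} {u v : String}
    (h : pvAdj edges u v) : v ∈ pvEnds edges := by
  rcases h with h | h
  · exact List.mem_flatMap.2 ⟨(u, v), h, by simp⟩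
  · exact List.mem_flatMap.2 ⟨(v, u), h, by simp⟩


-- a set S that contains start, is sound for reachability and closed under adjacency IS the reachable set
theorem pvClosureChar {edges : List (String × String)} {S : List String} {start : String}
    (h0 : start ∈ S) (hs : ∀ v ∈ S, pvReach edges start v)
    (hc : ∀ u ∈ S, ∀ v, pvAdj edges u v → v ∈ S) :
    ∀ v, v ∈ S ↔ pvReach edges start v := by
  intro v
  constructor
  · exact hs v
  · intro h
    induction h with
    | refl => exact h0
    | tail _ hadj ih => exact hc _ ih _ hadj


-- Set.equal only looks at membership
theorem pvEqual_congr {s s' t : List String} (h : ∀ x, x ∈ s ↔ x ∈ s') :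
    PySem.Set.equal s t = PySem.Set.equal s' t := by
  have key : ∀ (a a' : List String), (∀ x, x ∈ a ↔ x ∈ a') →
      PySem.Set.equal a t = true → PySem.Set.equal a' t = true := by
    intro a a' hm he
    simp only [PySem.Set.equal, PySem.Set.issubset, PySem.Set.contains,
      Bool.and_eq_true, List.all_eq_true, List.contains_iff_mem] at he ⊢
    exact ⟨fun x hx => he.1 x ((hm x).2 hx), fun x hx => (hm x).1 (he.2 x hx)⟩
  by_cases hEq : PySem.Set.equal s t = true
  · rw [hEq, key s s' h hEq]
  · have hEq' : PySem.Set.equal s' t ≠ true := fun he => hEq (key s' s (fun x => (h x).symm) he)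
    simp only [ne_eq, Bool.not_eq_true] at hEq hEq'
    rw [hEq, hEq']


theorem pvAdd_eq_self {c : List String} {x : String} :
    PySem.Set.add c x = c ↔ x ∈ c := by
  constructor
  · intro h
    by_cases hx : x ∈ c
    · exact hx
    · exfalso
      have hl := congrArg List.length h
      rw [PySem.Set.add] at hl
      simp [PySem.Set.contains, hx] at hl
  · intro hx
    rw [PySem.Set.add]
    simp [PySem.Set.contains, hx]


-- the degree counter is positive exactly on endpoints
theorem pvDeg_pos {edges : List (String × String)} {u : String} :
    (0 < (pvDeg edges).getD u 0) ↔ u ∈ pvEnds edges := by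
  have h1 : pvDeg edges
      = (pvEnds edges).foldl (fun d x => d.modify x 0 (· + 1)) PySem.Dict.empty := by
    unfold pvDeg pvEnds
    rw [List.foldl_flatMap]
    rfl
  rw [h1, PySem.Dict.getD_foldl_modify_add_one]
  simp only [PySem.Dict.getD_empty, zero_add]
  constructor
  · intro h
    exact List.count_pos_iff.mp (by exact_mod_cast h)
  · intro h
    exact_mod_cast List.count_pos_iff.mpr h


-- B's touched set is the endpoint set
theorem pvTouched_eq {edges : List (String × String)} :
    edges.foldl (fun s e => PySem.Set.add (PySem.Set.add s e.1) e.2) PySem.Set.empty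
      = PySem.Set.ofList (pvEnds edges) := by
  unfold pvEnds
  rw [PySem.Set.ofList, List.foldl_flatMap]
  rfl


-- the adjacency dict realises pvAdj
theorem pvGraph_mem {edges : List (String × String)} {x y : String} :
    y ∈ (pvGraph edges).getD x [] ↔ pvAdj edges x y := by
  have h1 : pvGraph edges
      = (edges.flatMap (fun e => [(e.1, e.2), (e.2, e.1)])).foldl
          (fun d p => d.modify p.1 [] (· ++ [p.2])) PySem.Dict.empty := by
    unfold pvGraph
    rw [List.foldl_flatMap]
    rfl
  rw [h1, PySem.Dict.getD_foldl_modify_append]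
  simp only [PySem.Dict.getD_empty, List.nil_append, List.mem_map, List.mem_filter,
    List.mem_flatMap, beq_iff_eq, pvAdj]
  constructor
  · rintro ⟨p, ⟨⟨e, he, hp⟩, hx⟩, hy⟩
    simp only [List.mem_cons, List.not_mem_nil, or_false] at hp
    rcases hp with rfl | rfl
    · exact Or.inl (by simpa [← hx, ← hy] using he)
    · exact Or.inr (by simpa [← hx, ← hy] using he)
  · rintro (h | h)
    · exact ⟨(x, y), ⟨⟨(x, y), h, by simp⟩, rfl⟩, rfl⟩
    · exact ⟨(x, y), ⟨⟨(y, x), h, by simp⟩, rfl⟩, rfl⟩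


theorem pvBFS_nil (g : PySem.Dict String (List String)) (fuel : Nat) (seen : PySem.Set String) :
    pvBFS g fuel seen [] = seen := by
  cases fuel <;> rfl

theorem pvBFS_cons (g : PySem.Dict String (List String)) (fuel : Nat) (seen : PySem.Set String)
    (x : String) (q : List String) :
    pvBFS g (fuel + 1) seen (x :: q)
      = pvBFS g fuel
          ((g.getD x []).foldl
            (fun (p : PySem.Set String × List String) y =>
              if PySem.Set.contains p.1 y then p else (PySem.Set.add p.1 y, p.2 ++ [y])) (seen, q)).1
          ((g.getD x []).foldl
            (fun (p : PySem.Set String × List String) y =>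
              if PySem.Set.contains p.1 y then p else (PySem.Set.add p.1 y, p.2 ++ [y])) (seen, q)).2 := rfl

theorem pvEnds_length (edges : List (String × String)) :
    (pvEnds edges).length = 2 * edges.length := by
  induction edges with
  | nil => rfl
  | cons e es ih => simp only [pvEnds, List.flatMap_cons] at ih ⊢; simp [ih]; omega

-- A's inner for-loop appends the same fresh elements to seen and to the queue
theorem pvFoldStep (ys : List String) (seen q : List String) (hnd : seen.Nodup) :
    ∃ new : List String,
      ys.foldl (fun (p : PySem.Set String × List String) y =>
          if PySem.Set.contains p.1 y then p else (PySem.Set.add p.1 y, p.2 ++ [y])) (seen, q)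
        = (seen ++ new, q ++ new)
      ∧ (seen ++ new : List String).Nodup ∧ new ⊆ ys ∧ ∀ z ∈ ys, z ∈ seen ++ new := by
  induction ys generalizing seen q with
  | nil => exact ⟨[], by simp, by simpa using hnd, by simp, by simp⟩
  | cons y ys ih =>
    by_cases hy : y ∈ seen
    · have hc : PySem.Set.contains seen y = true := (PySem.Set.contains_iff seen y).2 hy
      obtain ⟨new, h1, h2, h3, h4⟩ := ih seen q hnd
      refine ⟨new, ?_, h2, fun z hz => List.mem_cons_of_mem _ (h3 hz), ?_⟩
      · simpa [List.foldl_cons, hc, hy] using h1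
      · intro z hz
        rcases List.mem_cons.1 hz with rfl | hz
        · exact List.mem_append_left _ hy
        · exact h4 z hz
    · have hc : PySem.Set.contains seen y = false := by
        rw [← Bool.not_eq_true]
        exact fun hh => hy ((PySem.Set.contains_iff seen y).1 hh)
      have hadd : PySem.Set.add seen y = seen ++ [y] := by
        rw [PySem.Set.add, hc]
        simp
      have hnd' : (seen ++ [y] : List String).Nodup := by
        rw [List.nodup_append]
        refine ⟨hnd, List.nodup_singleton y, ?_⟩
        intro a ha b hb
        rw [List.mem_singleton] at hb
        subst hb
        exact fun e => hy (e ▸ ha)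
      obtain ⟨new, h1, h2, h3, h4⟩ := ih (seen ++ [y]) (q ++ [y]) hnd'
      refine ⟨y :: new, ?_, ?_, ?_, ?_⟩
      · simpa [List.foldl_cons, hc, hy, hadd, List.append_assoc] using h1
      · simpa [List.append_assoc] using h2
      · intro z hz
        rcases List.mem_cons.1 hz with rfl | hz
        · exact List.mem_cons_self ..
        · exact List.mem_cons_of_mem _ (h3 hz)
      · intro z hz
        rcases List.mem_cons.1 hz with rfl | hz
        · simp
        · simpa [List.append_assoc] using h4 z hz


-- BFS with enough fuel returns a start-containing, sound, adjacency-closed set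
theorem pvBFS_spec (edges : List (String × String)) (start : String) :
    ∀ (fuel : Nat) (seen q : List String),
      seen.Nodup →
      (∀ x ∈ q, x ∈ seen) →
      start ∈ seen →
      (∀ x ∈ seen, x ∈ start :: pvEnds edges) →
      (∀ x ∈ seen, pvReach edges start x) →
      (∀ x ∈ seen, x ∈ q ∨ ∀ y, pvAdj edges x y → y ∈ seen) →
      q.length + (start :: pvEnds edges).toFinset.card < fuel + seen.length →
      start ∈ pvBFS (pvGraph edges) fuel seen q
      ∧ (∀ v ∈ pvBFS (pvGraph edges) fuel seen q, pvReach edges start v)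
      ∧ (∀ u ∈ pvBFS (pvGraph edges) fuel seen q, ∀ v, pvAdj edges u v →
          v ∈ pvBFS (pvGraph edges) fuel seen q) := by
  intro fuel
  induction fuel with
  | zero =>
    intro seen q hnd hq h0 hU hsound hcl hfuel
    exfalso
    have h1 : seen.toFinset.card = seen.length := List.toFinset_card_of_nodup hnd
    have h2 : seen.toFinset ⊆ (start :: pvEnds edges).toFinset := by
      intro x hx
      simp only [List.mem_toFinset] at hx ⊢
      exact hU x hx
    have := Finset.card_le_card h2
    omega
  | succ fuel ih =>
    intro seen q hnd hq h0 hU hsound hcl hfuel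
    match q with
    | [] =>
      rw [pvBFS_nil]
      refine ⟨h0, hsound, ?_⟩
      intro u hu v hv
      rcases hcl u hu with h | h
      · simp at h
      · exact h v hv
    | x :: q' =>
      rw [pvBFS_cons]
      obtain ⟨new, h1, h2, h3, h4⟩ := pvFoldStep ((pvGraph edges).getD x []) seen q' hnd
      rw [h1]
      have hxseen : x ∈ seen := hq x (List.mem_cons_self ..)
      have hnewadj : ∀ z ∈ new, pvAdj edges x z := by
        intro z hz
        exact pvGraph_mem.1 (h3 hz)
      refine ih (seen ++ new) (q' ++ new) h2 ?_ (List.mem_append_left _ h0) ?_ ?_ ?_ ?_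
      · intro z hz
        rcases List.mem_append.1 hz with hz | hz
        · exact List.mem_append_left _ (hq z (List.mem_cons_of_mem _ hz))
        · exact List.mem_append_right _ hz
      · intro z hz
        rcases List.mem_append.1 hz with hz | hz
        · exact hU z hz
        · exact List.mem_cons_of_mem _ (pvAdj_mem_ends (hnewadj z hz))
      · intro z hz
        rcases List.mem_append.1 hz with hz | hz
        · exact hsound z hz
        · exact Relation.ReflTransGen.tail (hsound x hxseen) (hnewadj z hz)
      · intro z hz
        rcases List.mem_append.1 hz with hz | hz
        · rcases hcl z hz with hzq | hzc
          · rcases List.mem_cons.1 hzq with rfl | hzq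
            · exact Or.inr fun y hy => h4 y (pvGraph_mem.2 hy)
            · exact Or.inl (List.mem_append_left _ hzq)
          · exact Or.inr fun y hy => List.mem_append_left _ (hzc y hy)
        · exact Or.inl (List.mem_append_right _ hz)
      · simp only [List.length_append, List.length_cons] at hfuel ⊢
        omega


theorem pvRelax_prefix (c : List String) (e : String × String) : c <+: pvRelax c e := by
  have hadd : ∀ (d : List String) (z : String), d <+: PySem.Set.add d z := by
    intro d z
    rw [PySem.Set.add]
    split
    · exact List.prefix_refl d
    · exact ⟨[z], rfl⟩
  unfold pvRelax
  dsimp only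
  split
  · split
    · exact (hadd c e.2).trans (hadd _ e.1)
    · exact hadd c e.2
  · split
    · exact hadd c e.1
    · exact List.prefix_refl c


theorem pvPass_prefix (edges : List (String × String)) (c : List String) : c <+: pvPass edges c := by
  unfold pvPass
  induction edges generalizing c with
  | nil => exact List.prefix_refl c
  | cons e es ih => exact (pvRelax_prefix c e).trans (ih (pvRelax c e))


theorem pvRelax_nodup {c : List String} (e : String × String) (h : c.Nodup) :
    (pvRelax c e).Nodup := by
  unfold pvRelax
  dsimp only
  split
  · split
    · exact PySem.Set.nodup_add _ _ (PySem.Set.nodup_add _ _ h)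
    · exact PySem.Set.nodup_add _ _ h
  · split
    · exact PySem.Set.nodup_add _ _ h
    · exact h


theorem pvRelax_subU {c : List String} {e : String × String} {z : String}
    (h : z ∈ pvRelax c e) : z ∈ c ∨ z = e.1 ∨ z = e.2 := by
  unfold pvRelax at h
  dsimp only at h
  split at h
  · split at h
    · rcases (PySem.Set.mem_add _ _ _).1 h with h | rfl
      · rcases (PySem.Set.mem_add _ _ _).1 h with h | rfl
        · exact Or.inl h
        · exact Or.inr (Or.inr rfl)
      · exact Or.inr (Or.inl rfl)
    · rcases (PySem.Set.mem_add _ _ _).1 h with h | rfl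
      · exact Or.inl h
      · exact Or.inr (Or.inr rfl)
  · split at h
    · rcases (PySem.Set.mem_add _ _ _).1 h with h | rfl
      · exact Or.inl h
      · exact Or.inr (Or.inl rfl)
    · exact Or.inl h


theorem pvRelax_sound {edges : List (String × String)} {start : String} {c : List String}
    {e : String × String} (he : e ∈ edges) (hs : ∀ z ∈ c, pvReach edges start z) :
    ∀ z ∈ pvRelax c e, pvReach edges start z := by
  intro z hz
  unfold pvRelax at hz
  dsimp only at hz
  by_cases h1 : PySem.Set.contains c e.1 = true
  · rw [if_pos h1] at hz
    have he1 : e.1 ∈ c := (PySem.Set.contains_iff c e.1).1 h1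
    have hreach2 : pvReach edges start e.2 :=
      Relation.ReflTransGen.tail (hs e.1 he1) (Or.inl (by simpa using he))
    have hc1 : ∀ w ∈ PySem.Set.add c e.2, pvReach edges start w := by
      intro w hw
      rcases (PySem.Set.mem_add c e.2 w).1 hw with hw | rfl
      · exact hs w hw
      · exact hreach2
    split at hz
    · rcases (PySem.Set.mem_add _ e.1 z).1 hz with hz | rfl
      · exact hc1 z hz
      · exact hs e.1 he1
    · exact hc1 z hz
  · rw [if_neg h1] at hz
    split at hz
    next h2 =>
      rcases (PySem.Set.mem_add c e.1 z).1 hz with hz | rfl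
      · exact hs z hz
      · exact Relation.ReflTransGen.tail (hs e.2 ((PySem.Set.contains_iff c e.2).1 h2))
          (Or.inr (by simpa using he))
    next h2 => exact hs z hz


-- pass invariants (nodup, universe, soundness)
theorem pvPass_inv (edges : List (String × String)) (start : String) :
    ∀ (c : List String), c.Nodup → (∀ z ∈ c, z ∈ start :: pvEnds edges) →
      (∀ z ∈ c, pvReach edges start z) →
      (pvPass edges c).Nodup ∧ (∀ z ∈ pvPass edges c, z ∈ start :: pvEnds edges)
        ∧ (∀ z ∈ pvPass edges c, pvReach edges start z) := by
  suffices gen : ∀ (l : List (String × String)), (∀ e ∈ l, e ∈ edges) →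
      ∀ (c : List String), c.Nodup → (∀ z ∈ c, z ∈ start :: pvEnds edges) →
        (∀ z ∈ c, pvReach edges start z) →
        (l.foldl pvRelax c).Nodup ∧ (∀ z ∈ l.foldl pvRelax c, z ∈ start :: pvEnds edges)
          ∧ (∀ z ∈ l.foldl pvRelax c, pvReach edges start z) by
    intro c h1 h2 h3
    exact gen edges (fun _ h => h) c h1 h2 h3
  intro l
  induction l with
  | nil => exact fun _ c h1 h2 h3 => ⟨h1, h2, h3⟩
  | cons e l ih =>
    intro hl c h1 h2 h3
    have he : e ∈ edges := hl e (List.mem_cons_self ..)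
    refine ih (fun e' he' => hl e' (List.mem_cons_of_mem _ he')) _ (pvRelax_nodup e h1) ?_
      (pvRelax_sound he h3)
    intro z hz
    rcases pvRelax_subU hz with hz | rfl | rfl
    · exact h2 z hz
    · exact List.mem_cons_of_mem _ (pvAdj_mem_ends (v := e.1) (Or.inr (by simpa using he)))
    · exact List.mem_cons_of_mem _ (pvAdj_mem_ends (v := e.2) (Or.inl (by simpa using he)))


theorem pvRelax_eq_self {c : List String} {e : String × String} (h : pvRelax c e = c) :
    (e.1 ∈ c → e.2 ∈ c) ∧ (e.2 ∈ c → e.1 ∈ c) := by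
  have hpre_add : ∀ (d : List String) (z : String), d <+: PySem.Set.add d z := by
    intro d z
    rw [PySem.Set.add]
    split
    · exact List.prefix_refl d
    · exact ⟨[z], rfl⟩
  unfold pvRelax at h
  dsimp only at h
  by_cases h1 : PySem.Set.contains c e.1 = true
  · rw [if_pos h1] at h
    have he1 : e.1 ∈ c := (PySem.Set.contains_iff c e.1).1 h1
    have hc2 : PySem.Set.contains (PySem.Set.add c e.2) e.2 = true :=
      (PySem.Set.contains_iff _ _).2 ((PySem.Set.mem_add _ _ _).2 (Or.inr rfl))
    rw [if_pos hc2] at h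
    have hpre1 : c <+: PySem.Set.add c e.2 := hpre_add c e.2
    have hpre2 : PySem.Set.add c e.2 <+: c := by
      have h2 := hpre_add (PySem.Set.add c e.2) e.1
      rwa [h] at h2
    have heq : PySem.Set.add c e.2 = c := hpre2.eq_of_length_le hpre1.length_le
    exact ⟨fun _ => pvAdd_eq_self.1 heq, fun _ => he1⟩
  · rw [if_neg h1] at h
    have he1' : e.1 ∉ c := fun hm => h1 ((PySem.Set.contains_iff c e.1).2 hm)
    by_cases h2 : PySem.Set.contains c e.2 = true
    · rw [if_pos h2] at h
      exact absurd (pvAdd_eq_self.1 h) he1'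
    · rw [if_neg h2] at h
      exact ⟨fun hm => absurd ((PySem.Set.contains_iff c e.1).2 hm) h1,
        fun hm => absurd ((PySem.Set.contains_iff c e.2).2 hm) h2⟩


theorem pvPass_eq_self_closed {edges : List (String × String)} :
    ∀ {c : List String}, pvPass edges c = c →
      ∀ e ∈ edges, (e.1 ∈ c → e.2 ∈ c) ∧ (e.2 ∈ c → e.1 ∈ c) := by
  suffices gen : ∀ (l : List (String × String)) (c : List String),
      l.foldl pvRelax c = c → ∀ e ∈ l, (e.1 ∈ c → e.2 ∈ c) ∧ (e.2 ∈ c → e.1 ∈ c) by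
    intro c h e he
    exact gen edges c h e he
  intro l
  induction l with
  | nil =>
    intro c _ e he
    cases he
  | cons e0 l ih =>
    intro c h e he
    simp only [List.foldl_cons] at h
    have hp2 : pvRelax c e0 <+: c := by
      have h2 := pvPass_prefix l (pvRelax c e0)
      unfold pvPass at h2
      rwa [h] at h2
    have heq : pvRelax c e0 = c := hp2.eq_of_length_le (pvRelax_prefix c e0).length_le
    rcases List.mem_cons.1 he with rfl | he'
    · exact pvRelax_eq_self heq
    · exact ih c (by rwa [heq] at h) e he'


-- iterating the pass either reaches a fixpoint or keeps growing
theorem pvIter_grow (edges : List (String × String)) :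
    ∀ (n : Nat) (c : List String),
      pvPass edges ((List.range n).foldl (fun c _ => pvPass edges c) c)
          = (List.range n).foldl (fun c _ => pvPass edges c) c
      ∨ c.length + n ≤ ((List.range n).foldl (fun c _ => pvPass edges c) c).length := by
  intro n
  induction n with
  | zero =>
    intro c
    right
    simp
  | succ n ih =>
    intro c
    set F := (List.range n).foldl (fun c _ => pvPass edges c) c with hF
    have hstep : (List.range (n + 1)).foldl (fun c _ => pvPass edges c) c
        = pvPass edges F := by
      rw [hF, List.range_succ, List.foldl_append]
      rfl
    rcases ih c with hfix | hlen
    · rw [← hF] at hfix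
      left
      rw [hstep, hfix, hfix]
    · rw [← hF] at hlen
      by_cases hfix : pvPass edges F = F
      · left
        rw [hstep, hfix, hfix]
      · right
        rw [hstep]
        obtain ⟨t, ht⟩ := pvPass_prefix edges F
        have htne : t ≠ [] := by
          intro h0
          rw [h0, List.append_nil] at ht
          exact hfix ht.symm
        have hlt := congrArg List.length ht
        simp only [List.length_append] at hlt
        have h1 : 1 ≤ t.length := List.length_pos_iff.2 htne
        omega


-- the iterated-pass result with 2*|edges| passes is start-containing, sound and closed
theorem pvIter_spec (edges : List (String × String)) (start : String) :
    start ∈ (List.range (2 * edges.length)).foldl (fun c _ => pvPass edges c) [start]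
    ∧ (∀ v ∈ (List.range (2 * edges.length)).foldl (fun c _ => pvPass edges c) [start],
        pvReach edges start v)
    ∧ (∀ u ∈ (List.range (2 * edges.length)).foldl (fun c _ => pvPass edges c) [start],
        ∀ v, pvAdj edges u v →
          v ∈ (List.range (2 * edges.length)).foldl (fun c _ => pvPass edges c) [start]) := by
  have hstart0 : pvReach edges start start := Relation.ReflTransGen.refl
  have hinv : ∀ n : Nat,
      ((List.range n).foldl (fun c _ => pvPass edges c) [start]).Nodup
      ∧ (∀ z ∈ (List.range n).foldl (fun c _ => pvPass edges c) [start], z ∈ start :: pvEnds edges)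
      ∧ (∀ z ∈ (List.range n).foldl (fun c _ => pvPass edges c) [start], pvReach edges start z)
      ∧ start ∈ (List.range n).foldl (fun c _ => pvPass edges c) [start] := by
    intro n
    induction n with
    | zero =>
      refine ⟨by simp, ?_, ?_, by simp⟩
      · intro z hz
        rcases List.mem_singleton.1 hz with rfl
        exact List.mem_cons_self ..
      · intro z hz
        rcases List.mem_singleton.1 hz with rfl
        exact hstart0
    | succ n ih =>
      have hstep : (List.range (n + 1)).foldl (fun c _ => pvPass edges c) [start]
          = pvPass edges ((List.range n).foldl (fun c _ => pvPass edges c) [start]) := by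
        rw [List.range_succ, List.foldl_append]
        rfl
      obtain ⟨ih1, ih2, ih3, ih4⟩ := ih
      obtain ⟨j1, j2, j3⟩ := pvPass_inv edges start _ ih1 ih2 ih3
      refine ⟨by rwa [hstep], by rwa [hstep], by rwa [hstep], ?_⟩
      rw [hstep]
      exact (pvPass_prefix edges _).subset ih4
  obtain ⟨hnd, hU, hsound, hmem⟩ := hinv (2 * edges.length)
  refine ⟨hmem, hsound, ?_⟩
  rcases pvIter_grow edges (2 * edges.length) [start] with hfix | hlen
  · intro u hu v hv
    rcases hv with hv | hv
    · exact (pvPass_eq_self_closed hfix (u, v) hv).1 hu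
    · exact (pvPass_eq_self_closed hfix (v, u) hv).2 hu
  · intro u hu v hv
    have hvV : v ∈ start :: pvEnds edges := List.mem_cons_of_mem _ (pvAdj_mem_ends hv)
    have hsub : ((List.range (2 * edges.length)).foldl (fun c _ => pvPass edges c) [start]).toFinset
        ⊆ (start :: pvEnds edges).toFinset := by
      intro x hx
      simp only [List.mem_toFinset] at hx ⊢
      exact hU x hx
    have hcard1 := List.toFinset_card_of_nodup hnd
    have hcard2 : (start :: pvEnds edges).toFinset.card ≤ (start :: pvEnds edges).length :=
      List.toFinset_card_le _
    have hVlen : (start :: pvEnds edges).length = 2 * edges.length + 1 := by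
      simp [pvEnds_length]
    have heq := Finset.eq_of_subset_of_card_le hsub (by
      simp only [List.length_singleton] at hlen
      omega)
    have : v ∈ ((List.range (2 * edges.length)).foldl (fun c _ => pvPass edges c) [start]).toFinset := by
      rw [heq]
      exact List.mem_toFinset.2 hvV
    exact List.mem_toFinset.1 this


-- ===== VERDICT (by name: the statement is the Claim_ definition above) =====
theorem undirected_connectivity_ok_py_spec : Claim_equal_undirected_connectivity_ok_py := by
  intro nodes edges _
  unfold Spec_undirected_connectivity_ok_py
  have hA : undirected_connectivity_ok_py nodes edges =
      match PySem.Set.ofList (nodes.filter (fun u => decide (0 < (pvDeg edges).getD u 0))) with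
      | [] => true
      | start :: _ =>
          PySem.Set.equal
            (pvBFS (pvGraph edges) (2 * edges.length + 2) (PySem.Set.add PySem.Set.empty start) [start])
            (PySem.Set.ofList (nodes.filter (fun u => decide (0 < (pvDeg edges).getD u 0)))) := rfl
  have hB : undirected_connectivity_ok_py_alt nodes edges =
      match PySem.Set.ofList (nodes.filter (fun u => PySem.Set.contains
          (edges.foldl (fun s e => PySem.Set.add (PySem.Set.add s e.1) e.2) PySem.Set.empty) u)) with
      | [] => true
      | start :: _ =>
          PySem.Set.equal
            ((List.range (2 * edges.length)).foldl (fun c _ => pvPass edges c)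
              (PySem.Set.add PySem.Set.empty start))
            (PySem.Set.ofList (nodes.filter (fun u => PySem.Set.contains
              (edges.foldl (fun s e => PySem.Set.add (PySem.Set.add s e.1) e.2) PySem.Set.empty) u))) := rfl
  have hfilter : nodes.filter (fun u => decide (0 < (pvDeg edges).getD u 0))
      = nodes.filter (fun u => PySem.Set.contains
          (edges.foldl (fun s e => PySem.Set.add (PySem.Set.add s e.1) e.2) PySem.Set.empty) u) := by
    apply List.filter_congr
    intro u _
    rw [pvTouched_eq]
    by_cases hu : u ∈ pvEnds edges
    · rw [decide_eq_true (pvDeg_pos.2 hu),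
        (PySem.Set.contains_iff _ _).2 ((PySem.Set.mem_ofList _ _).2 hu)]
    · have hd : ¬ (0 < (pvDeg edges).getD u 0) := fun hp => hu (pvDeg_pos.1 hp)
      have hc : PySem.Set.contains (PySem.Set.ofList (pvEnds edges)) u = false := by
        rw [← Bool.not_eq_true]
        exact fun hh => hu ((PySem.Set.mem_ofList _ _).1 ((PySem.Set.contains_iff _ _).1 hh))
      rw [decide_eq_false hd, hc]
  rw [hA, hB, hfilter]
  cases hNI : PySem.Set.ofList (nodes.filter (fun u => PySem.Set.contains
      (edges.foldl (fun s e => PySem.Set.add (PySem.Set.add s e.1) e.2) PySem.Set.empty) u)) with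
  | nil => rfl
  | cons start rest =>
    dsimp only
    have hadd0 : PySem.Set.add PySem.Set.empty start = [start] := rfl
    rw [hadd0]
    -- A's BFS set and B's iterated-pass set both contain start, are sound and closed, hence both
    -- are exactly the set of vertices reachable from start
    have hcard : (start :: pvEnds edges).toFinset.card ≤ 2 * edges.length + 1 := by
      have h1 := List.toFinset_card_le (start :: pvEnds edges)
      have h2 : (start :: pvEnds edges).length = 2 * edges.length + 1 := by simp [pvEnds_length]
      omega
    obtain ⟨hA0, hAs, hAc⟩ := pvBFS_spec edges start (2 * edges.length + 2) [start] [start]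
      (by simp) (fun x hx => hx) (List.mem_singleton_self start)
      (by intro x hx; rw [List.mem_singleton] at hx; subst hx; exact List.mem_cons_self ..)
      (by intro x hx; rw [List.mem_singleton] at hx; subst hx; exact Relation.ReflTransGen.refl)
      (fun x hx => Or.inl hx)
      (by simp only [List.length_singleton]; omega)
    obtain ⟨hB0, hBs, hBc⟩ := pvIter_spec edges start
    have hAchar := pvClosureChar hA0 hAs hAc
    have hBchar := pvClosureChar hB0 hBs hBc
    exact pvEqual_congr (fun x => (hAchar x).trans (hBchar x).symm)
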